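-- pv_equiv track=rewrite | github.com/AndreeWanya/graduate-programming-school | survived/the_white_walkers.py | white_walkers
-- ===== SOURCE A (Python) =====
-- def white_walkers(village: str) -> bool:
--     first = [0, 0]
--     flag = False
--     for i in range(len(village)):
--         if village[i].isdigit() and int(first[0]) + int(village[i]) == 10:
--             if village[first[1]: i].count('=') == 3:
--                 flag = True
--                 first = [village[i], i]
--             else:
--                 return False
--         elif village[i].isdigit():
--             first = [village[i], i]
--     return flag
-- ===== SOURCE B (Python) =====
-- def white_walkers(village: str) -> bool:
--     # One pass: keep the last digit seen and a running count of '=' since it,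
--     # instead of re-counting a slice for every digit pair.
--     flag = False
--     last = 0     # value of the previous digit (0 before any digit is seen)
--     eq = 0       # number of '=' since the previous digit
--     for ch in village:
--         if ch.isdigit():
--             if last + int(ch) == 10:
--                 if eq != 3:
--                     return False
--                 flag = True
--             last = int(ch)
--             eq = 0
--         elif ch == '=':
--             eq += 1
--     return flag
-- ===== Notes on version B (the rewrite author's own statement) =====
-- stated objective: faster
-- what changed: Replaces the per-digit slice-and-count of '=' with a single pass that maintains a running '=' counter reset at each digit, removing the inner scan.
import Mathlib
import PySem

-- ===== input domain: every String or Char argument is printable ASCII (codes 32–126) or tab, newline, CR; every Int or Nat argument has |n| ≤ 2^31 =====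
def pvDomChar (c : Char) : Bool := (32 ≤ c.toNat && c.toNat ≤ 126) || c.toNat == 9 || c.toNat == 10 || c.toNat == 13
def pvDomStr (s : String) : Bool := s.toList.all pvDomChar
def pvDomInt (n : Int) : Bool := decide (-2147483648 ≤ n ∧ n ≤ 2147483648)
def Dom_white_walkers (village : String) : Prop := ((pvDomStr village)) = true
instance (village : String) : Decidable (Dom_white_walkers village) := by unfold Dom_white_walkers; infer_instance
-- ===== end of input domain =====

-- B replaces A's per-digit slice-and-count of '=' with a single pass keeping a running
-- '=' counter that is reset at every digit (objective: faster, the inner scan disappears).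

-- ===== PORT A =====
-- int(c) for a single digit character (A only applies it under an isdigit guard)
def waDigitVal (c : Char) : Int := (c.toNat : Int) - 48

-- the loop of A: `first` is (int(first[0]), first[1]); `village[first[1]:i].count('=')`
-- with a one-character needle is the count of the character '=' in the slice (exact).
def waLoopA (village : List Char) (rest : List Char) (i : Nat) (first : Int × Nat)
    (flag : Bool) : Bool :=
  match rest with
  | [] => flag
  | c :: rs =>
    if PySem.Chars.isdigit c && (first.1 + waDigitVal c == 10) then
      if (PySem.List.slice village (some (first.2 : Int)) (some (i : Int))).count '=' == 3 then
        waLoopA village rs (i + 1) (waDigitVal c, i) true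
      else false
    else if PySem.Chars.isdigit c then
      waLoopA village rs (i + 1) (waDigitVal c, i) flag
    else
      waLoopA village rs (i + 1) first flag

def white_walkers (village : String) : Bool :=
  waLoopA village.toList village.toList 0 (0, 0) false

-- ===== PORT B =====
-- the loop of B: last digit value, running '=' count since it, flag
def waLoopB (rest : List Char) (last : Int) (eq : Int) (flag : Bool) : Bool :=
  match rest with
  | [] => flag
  | c :: rs =>
    if PySem.Chars.isdigit c then
      if last + waDigitVal c == 10 then
        if eq != 3 then false else waLoopB rs (waDigitVal c) 0 true
      else waLoopB rs (waDigitVal c) 0 flag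
    else if c == '=' then waLoopB rs last (eq + 1) flag
    else waLoopB rs last eq flag

def white_walkers_alt (village : String) : Bool :=
  waLoopB village.toList 0 0 false

-- ===== PRECONDITION & SPEC =====
def Spec_white_walkers (village : String) (out : Bool) : Prop := out = white_walkers_alt village
instance (village : String) (out : Bool) : Decidable (Spec_white_walkers village out) := by unfold Spec_white_walkers; infer_instance

-- ===== CLAIM (what is proved, stated in full; the proofs are below) =====
def Claim_equal_white_walkers : Prop := ∀ (village : String), Dom_white_walkers village → Spec_white_walkers village (white_walkers village)

-- ===== LEMMAS AND PROOFS =====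

theorem eq_of_isdigit_false_of_eq {c : Char} (h : c = '=') : PySem.Chars.isdigit c = false := by
  subst h; decide

-- the loop invariant: B's running counter equals A's slice count
theorem waLoop_eq (village : List Char) :
    ∀ (rest : List Char) (i j : Nat) (last : Int) (flag : Bool),
      rest = village.drop i → j ≤ i →
      waLoopA village rest i (last, j) flag
        = waLoopB rest last ((((village.drop j).take (i - j)).count '=' : Nat) : Int) flag := by
  intro rest
  induction rest with
  | nil => intro i j last flag _ _; simp [waLoopA, waLoopB]
  | cons c rs ih =>
    intro i j last flag hdrop hji
    have hi : village.drop i = c :: rs := hdrop.symm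
    have hrs : rs = village.drop (i + 1) := by
      have : village.drop (i + 1) = (village.drop i).drop 1 := by
        rw [List.drop_drop]
      rw [this, hi]; rfl
    -- the slice is the drop/take window
    have hslice : PySem.List.slice village (some (j : Int)) (some (i : Int))
        = (village.drop j).take (i - j) := PySem.List.slice_natCast ..
    -- extending the window by one character appends c
    have hstep : (village.drop j).take (i + 1 - j)
        = (village.drop j).take (i - j) ++ [c] := by
      have h2 : (village.drop j)[i - j]? = some c := by
        rw [List.getElem?_drop, show j + (i - j) = i by omega]
        have : (village.drop i)[0]? = some c := by rw [hi]; rfl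
        simpa [List.getElem?_drop] using this
      rw [show i + 1 - j = (i - j) + 1 by omega, List.take_add_one, h2]
      rfl
    by_cases hd : PySem.Chars.isdigit c = true
    · have hcne : ¬ c = '=' := fun h => by simp [eq_of_isdigit_false_of_eq h] at hd
      have hwin : ((village.drop i).take (i + 1 - i)).count '=' = 0 := by
        rw [show i + 1 - i = 1 by omega, show (village.drop i).take 1 = [c] by rw [hi]; rfl]
        simp [hcne]
      by_cases hs : last + waDigitVal c = 10
      · -- digit, pair sums to 10
        have ihr := ih (i + 1) i (waDigitVal c) true hrs (by omega)
        rw [hwin] at ihr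
        by_cases h3 : ((village.drop j).take (i - j)).count '=' = 3
        · simp only [waLoopA, waLoopB, hd, hs, hslice, h3]
          simpa using ihr
        · have hb : ((((village.drop j).take (i - j)).count '=' : Nat) : Int) ≠ 3 := by
            exact_mod_cast fun h => h3 (by exact_mod_cast h)
          simp only [waLoopA, waLoopB, hd, hs, hslice]
          simp [h3, hb]
      · -- digit, pair does not sum to 10
        have ihr := ih (i + 1) i (waDigitVal c) flag hrs (by omega)
        rw [hwin] at ihr
        simp only [waLoopA, waLoopB, hd]
        simpa [hs] using ihr
    · -- not a digit
      have hd' : PySem.Chars.isdigit c = false := by simpa using hd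
      have ihr := ih (i + 1) j last flag hrs (by omega)
      rw [hstep] at ihr
      by_cases hc : c = '='
      · subst hc
        simp only [waLoopA, waLoopB, hd', Bool.false_and, Bool.false_eq_true, if_false,
          BEq.rfl, if_true]
        rw [ihr]
        congr 1
        simp [List.count_append]
      · simp only [waLoopA, waLoopB, hd', Bool.false_and, Bool.false_eq_true, if_false]
        rw [if_neg (by simpa using hc), ihr]
        congr 1
        simp [List.count_append, hc]

-- ===== VERDICT (by name: the statement is the Claim_ definition above) =====
theorem white_walkers_spec : Claim_equal_white_walkers := by
  intro village _
  unfold Spec_white_walkers white_walkers white_walkers_alt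
  have h := waLoop_eq village.toList village.toList 0 0 0 false (by simp) (Nat.le_refl 0)
  simpa using h
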